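-- pv_equiv track=rewrite | github.com/MrBrantCode/unitest_baseline | mut_generate/mist_train_cf/cf_21709/solution.py | find_max_positive
-- ===== SOURCE A (Python) =====
-- def find_max_positive(arr):
--     max_positive = -1
--     max_index = -1
--
--     for i, num in enumerate(arr):
--         if num > 0 and (max_positive == -1 or num > max_positive):
--             max_positive = num
--             max_index = i
--
--     return max_index
-- ===== SOURCE B (Python) =====
-- def find_max_positive(arr):
--     max_val = max((n for n in arr if n > 0), default=None)
--     if max_val is None:
--         return -1
--     return arr.index(max_val)
-- ===== Notes on version B (the rewrite author's own statement) =====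
-- stated objective: simpler
-- what changed: Replaces the single accumulating scan with dual state (running max and its index) by a filter-and-max pass followed by arr.index() for the first occurrence.
import Mathlib
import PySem

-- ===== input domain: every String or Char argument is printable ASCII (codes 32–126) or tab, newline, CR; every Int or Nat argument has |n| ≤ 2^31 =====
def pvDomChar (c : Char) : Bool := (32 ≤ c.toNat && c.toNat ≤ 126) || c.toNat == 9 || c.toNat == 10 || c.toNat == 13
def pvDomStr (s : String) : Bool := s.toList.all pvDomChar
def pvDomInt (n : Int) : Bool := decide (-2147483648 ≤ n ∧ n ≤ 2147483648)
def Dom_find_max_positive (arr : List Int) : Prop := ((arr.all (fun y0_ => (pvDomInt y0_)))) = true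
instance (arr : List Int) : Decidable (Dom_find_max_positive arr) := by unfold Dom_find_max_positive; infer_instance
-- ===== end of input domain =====

-- B replaces A's single accumulating scan (running max + its index) by a
-- filter-and-max pass followed by a first-occurrence index lookup (simpler decomposition).


-- ===== PORT A =====
def find_max_positive (arr : List Int) : Int :=
  let st := (PySem.List.enumerate arr 0).foldl
    (fun (st : Int × Int) (p : Int × Int) =>
      if 0 < p.2 ∧ (st.1 = -1 ∨ st.1 < p.2) then (p.2, p.1) else st)
    (-1, -1)
  st.2

-- ===== PORT B =====
def find_max_positive_alt (arr : List Int) : Int :=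
  match PySem.List.max? (arr.filter (fun n => decide (0 < n))) (fun x => x) with
  | none => -1
  -- arr.index(max_val): the value is an element of arr, so index? is provably some;
  -- .getD 0 only makes the port total.
  | some m => ((PySem.List.index? arr m).getD 0 : Int)

-- ===== PRECONDITION & SPEC =====
def Spec_find_max_positive (arr : List Int) (out : Int) : Prop := out = find_max_positive_alt arr
instance (arr : List Int) (out : Int) : Decidable (Spec_find_max_positive arr out) := by unfold Spec_find_max_positive; infer_instance

-- ===== CLAIM (what is proved, stated in full; the proofs are below) =====
def Claim_equal_find_max_positive : Prop := ∀ (arr : List Int), Dom_find_max_positive arr → Spec_find_max_positive arr (find_max_positive arr)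

-- ===== LEMMAS AND PROOFS =====

-- the fold of port A, abbreviated for the invariant
def foldA (arr : List Int) : Int × Int :=
  (PySem.List.enumerate arr 0).foldl
    (fun (st : Int × Int) (p : Int × Int) =>
      if 0 < p.2 ∧ (st.1 = -1 ∨ st.1 < p.2) then (p.2, p.1) else st)
    (-1, -1)

-- invariant of A's scan
def InvA (arr : List Int) : Prop :=
  (foldA arr = (-1, -1) ∧ ∀ y ∈ arr, y ≤ 0)
  ∨ (∃ m : Int, ∃ i : Nat, foldA arr = (m, (i : Int)) ∧ 0 < m ∧ m ∈ arr ∧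
      (∀ y ∈ arr, y ≤ m) ∧ PySem.List.index? arr m = some i)

theorem foldA_append (arr : List Int) (x : Int) :
    foldA (arr ++ [x]) =
      (if 0 < x ∧ ((foldA arr).1 = -1 ∨ (foldA arr).1 < x)
       then (x, (arr.length : Int)) else foldA arr) := by
  simp [foldA, PySem.List.enumerate_append, List.foldl_append, PySem.List.enumerate_cons]

theorem invA_holds (arr : List Int) : InvA arr := by
  induction arr using List.reverseRecOn with
  | nil => left; constructor <;> simp [foldA, PySem.List.enumerate_nil]
  | append_singleton arr x ih =>
    rcases ih with ⟨h, hall⟩ | ⟨m, i, hst, hm, hmem, hbd, hidx⟩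
    · by_cases hx : 0 < x
      · right
        refine ⟨x, arr.length, ?_, hx, by simp, ?_, ?_⟩
        · rw [foldA_append, h]; simp [hx]
        · intro y hy
          rcases List.mem_append.1 hy with hy | hy
          · exact le_trans (hall y hy) (le_of_lt hx)
          · simp_all
        · refine PySem.List.index?_append_singleton_self (l := arr) x ?_
          intro hxin; exact absurd (hall x hxin) (by omega)
      · left
        constructor
        · rw [foldA_append, h]; simp [hx]
        · intro y hy
          rcases List.mem_append.1 hy with hy | hy
          · exact hall y hy
          · simp at hy; omega
    · by_cases hx : m < x
      · right
        have hxpos : 0 < x := lt_trans hm hx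
        refine ⟨x, arr.length, ?_, hxpos, by simp, ?_, ?_⟩
        · rw [foldA_append, hst]; simp [hxpos, hx]
        · intro y hy
          rcases List.mem_append.1 hy with hy | hy
          · exact le_trans (hbd y hy) (le_of_lt hx)
          · simp_all
        · refine PySem.List.index?_append_singleton_self (l := arr) x ?_
          intro hxin; exact absurd (hbd x hxin) (by omega)
      · right
        refine ⟨m, i, ?_, hm, List.mem_append_left _ hmem, ?_, ?_⟩
        · rw [foldA_append, hst]
          have : ¬ (0 < x ∧ ((m : Int) = -1 ∨ m < x)) := by
            rintro ⟨-, h1 | h2⟩ <;> omega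
          simp_all
        · intro y hy
          rcases List.mem_append.1 hy with hy | hy
          · exact hbd y hy
          · simp at hy; omega
        · rw [PySem.List.index?_append_of_mem _ hmem]; exact hidx

-- the maximum value is unique, so max? picks it whenever it is a member and a bound
theorem max?_id_unique (L : List Int) (m : Int) (hm : m ∈ L) (hb : ∀ y ∈ L, y ≤ m) :
    PySem.List.max? L (fun x => x) = some m := by
  cases h : PySem.List.max? L (fun x => x) with
  | none =>
    rw [PySem.List.max?_eq_none_iff] at h
    subst h; simp at hm
  | some m' =>
    have h1 : m' ∈ L := PySem.List.max?_mem h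
    have h2 := PySem.List.max?_isMax h m hm
    have := hb m' h1
    simp_all [le_antisymm this h2]

theorem filter_pos_eq_nil (arr : List Int) (h : ∀ y ∈ arr, y ≤ 0) :
    arr.filter (fun n => decide (0 < n)) = [] := by
  rw [List.filter_eq_nil_iff]
  intro a ha
  have := h a ha
  simp; omega

-- ===== VERDICT (by name: the statement is the Claim_ definition above) =====
theorem find_max_positive_spec : Claim_equal_find_max_positive := by
  intro arr _
  unfold Spec_find_max_positive
  have hA : find_max_positive arr = (foldA arr).2 := by
    simp [find_max_positive, foldA]
  rcases invA_holds arr with ⟨h, hall⟩ | ⟨m, i, hst, hm, hmem, hbd, hidx⟩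
  · rw [hA, h]
    unfold find_max_positive_alt
    rw [filter_pos_eq_nil arr hall]
    simp [PySem.List.max?]
  · rw [hA, hst]
    unfold find_max_positive_alt
    have hmF : m ∈ arr.filter (fun n => decide (0 < n)) := by
      simp [List.mem_filter, hmem, hm]
    have hbF : ∀ y ∈ arr.filter (fun n => decide (0 < n)), y ≤ m := by
      intro y hy; exact hbd y (List.mem_filter.1 hy).1
    rw [max?_id_unique _ m hmF hbF]
    rw [PySem.List.index?_eq_idxOf?] at hidx
    simp [hidx]
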